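-- pv_equiv track=rewrite | github.com/minyeong981/Algorithm | 백준/Gold/21608. 상어 초등학교/상어 초등학교.py | calS
-- ===== SOURCE A (Python) =====
-- def calS(seats, like, n):
--     satisfaction = 0 # 만족도
--
--     for r in range(n):
--         for c in range(n):
--             cnt = 0
--             for dr, dc in [(0, 1), (1, 0), (-1, 0), (0, -1)]:
--                 nr = r + dr
--                 nc = c + dc
--                 if 0 <= nr < n and 0 <= nc < n:
--                     if seats[nr][nc] in like[seats[r][c]]: # 좋아하는 학생 번호 있으면 cnt +1
--                         cnt += 1
--
--             if cnt == 1: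
--                 satisfaction += 1
--             elif cnt == 2:
--                 satisfaction += 10
--             elif cnt == 3:
--                 satisfaction += 100
--             elif cnt == 4:
--                 satisfaction += 1000
--
--     return satisfaction
-- ===== SOURCE B (Python) =====
-- def calS(seats, like, n):
--     cnt = [[0] * n for _ in range(n)]
--     for r in range(n):
--         for c in range(n):
--             if c + 1 < n:
--                 s, t = seats[r][c], seats[r][c + 1]
--                 if t in like[s]:
--                     cnt[r][c] += 1
--                 if s in like[t]:
--                     cnt[r][c + 1] += 1
--             if r + 1 < n:
--                 s, t = seats[r][c], seats[r + 1][c]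
--                 if t in like[s]:
--                     cnt[r][c] += 1
--                 if s in like[t]:
--                     cnt[r + 1][c] += 1
--     total = 0
--     for row in cnt:
--         for v in row:
--             if v:
--                 total += 10 ** (v - 1)
--     return total
-- ===== Notes on version B (the rewrite author's own statement) =====
-- stated objective: alternative
-- what changed: Replaces the per-cell scan of all four directions by a single pass over interior edges (right/down neighbours only) that accumulates a count grid for both endpoints, followed by a second pass mapping each count k>0 to 10**(k-1); each adjacency is touched once instead of twice.
import Mathlib
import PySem

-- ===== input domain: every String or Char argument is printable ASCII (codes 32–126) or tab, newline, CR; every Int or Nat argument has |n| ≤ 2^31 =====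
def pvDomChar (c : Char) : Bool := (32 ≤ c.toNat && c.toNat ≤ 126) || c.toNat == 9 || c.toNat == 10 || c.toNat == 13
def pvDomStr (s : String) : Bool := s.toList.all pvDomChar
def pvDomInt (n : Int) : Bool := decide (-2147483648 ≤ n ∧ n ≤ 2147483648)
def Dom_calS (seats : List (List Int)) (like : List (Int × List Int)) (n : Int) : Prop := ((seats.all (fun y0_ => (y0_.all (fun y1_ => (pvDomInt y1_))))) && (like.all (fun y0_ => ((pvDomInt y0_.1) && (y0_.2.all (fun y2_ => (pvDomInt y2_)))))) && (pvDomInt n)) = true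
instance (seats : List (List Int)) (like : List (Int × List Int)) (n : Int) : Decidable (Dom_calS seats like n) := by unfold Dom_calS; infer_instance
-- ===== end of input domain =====

-- B replaces the per-cell scan of all four directions by one pass over interior
-- (right/down) edges that accumulates a count grid for both endpoints, then a
-- second pass maps each count k > 0 to 10^(k-1); a different decomposition of
-- the same O(n^2) work (objective: alternative).

-- ===== PORT A =====
-- shared Python-semantics accessors: seats[r][c] and 'x in like[s]' (used by both ports)
def seatAt (seats : List (List Int)) (r c : Int) : Int :=
  PySem.List.pyGetD (PySem.List.pyGetD seats r []) c 0

def likesOf (like : List (Int × List Int)) (s t : Int) : Bool :=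
  ((PySem.Dict.mk like).getD s []).contains t

def calS (seats : List (List Int)) (like : List (Int × List Int)) (n : Int) : Int :=
  (PySem.List.pyRange 0 n 1).foldl (fun satisfaction r =>
    (PySem.List.pyRange 0 n 1).foldl (fun satisfaction c =>
      let cnt : Int := [((0:Int),(1:Int)), (1,0), (-1,0), (0,-1)].foldl (fun cnt dd =>
        let nr := r + dd.1
        let nc := c + dd.2
        if 0 ≤ nr ∧ nr < n ∧ 0 ≤ nc ∧ nc < n then
          if likesOf like (seatAt seats r c) (seatAt seats nr nc) then cnt + 1 else cnt
        else cnt) 0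
      if cnt = 1 then satisfaction + 1
      else if cnt = 2 then satisfaction + 10
      else if cnt = 3 then satisfaction + 100
      else if cnt = 4 then satisfaction + 1000
      else satisfaction) satisfaction) 0

-- ===== PORT B =====
def bBump (g : List (List Int)) (r c : Int) : List (List Int) :=
  g.modify r.toNat (fun row => row.modify c.toNat (· + 1))

-- the body of B's edge loop for one cell (r, c): right edge, then down edge
def bCell (seats : List (List Int)) (like : List (Int × List Int)) (n : Int)
    (g : List (List Int)) (r c : Int) : List (List Int) :=
  let g1 :=
    if c + 1 < n then
      let s := seatAt seats r c
      let t := seatAt seats r (c + 1)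
      let g' := if likesOf like s t then bBump g r c else g
      if likesOf like t s then bBump g' r (c + 1) else g'
    else g
  if r + 1 < n then
    let s := seatAt seats r c
    let t := seatAt seats (r + 1) c
    let g' := if likesOf like s t then bBump g1 r c else g1
    if likesOf like t s then bBump g' (r + 1) c else g'
  else g1

def calS_alt (seats : List (List Int)) (like : List (Int × List Int)) (n : Int) : Int :=
  let g := (PySem.List.pyRange 0 n 1).foldl (fun g r =>
    (PySem.List.pyRange 0 n 1).foldl (fun g c => bCell seats like n g r c) g)
    (List.replicate n.toNat (List.replicate n.toNat (0 : Int)))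
  g.foldl (fun total row => row.foldl (fun total v =>
    if v ≠ 0 then total + 10 ^ (v - 1).toNat else total) total) 0

-- ===== PRECONDITION & SPEC =====
-- Pre_ excludes exactly the inputs where Python A raises: for n ≥ 2 the top-left
-- n×n block of seats must exist (else IndexError) and every student seated there
-- must be a key of like (else KeyError); for n ≤ 1 A touches neither and returns 0.
def Pre_calS (seats : List (List Int)) (like : List (Int × List Int)) (n : Int) : Prop :=
  2 ≤ n →
    (n.toNat ≤ seats.length ∧
      ∀ row ∈ seats.take n.toNat, n.toNat ≤ row.length ∧
        ∀ s ∈ row.take n.toNat, ((PySem.Dict.mk like).get? s).isSome)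
instance (seats : List (List Int)) (like : List (Int × List Int)) (n : Int) : Decidable (Pre_calS seats like n) := by unfold Pre_calS; infer_instance

def pvWitness_calS : List (List Int) × (List (Int × List Int)) × Int :=
  ([[1, 2], [3, 4]], [(1, [2, 3]), (2, [1]), (3, []), (4, [1])], 2)

def Spec_calS (seats : List (List Int)) (like : List (Int × List Int)) (n : Int) (out : Int) : Prop := out = calS_alt seats like n
instance (seats : List (List Int)) (like : List (Int × List Int)) (n : Int) (out : Int) : Decidable (Spec_calS seats like n out) := by unfold Spec_calS; infer_instance

-- ===== CLAIM (what is proved, stated in full; the proofs are below) =====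
def Claim_equal_calS : Prop := ∀ (seats : List (List Int)) (like : List (Int × List Int)) (n : Int), Dom_calS seats like n → Pre_calS seats like n → Spec_calS seats like n (calS seats like n)

-- ===== LEMMAS AND PROOFS =====

-- A's score table and B's power formula
def scoreA (k : Int) : Int :=
  if k = 1 then 1 else if k = 2 then 10 else if k = 3 then 100 else if k = 4 then 1000 else 0
def score10 (v : Int) : Int := if v ≠ 0 then 10 ^ (v - 1).toNat else 0

-- A's per-cell neighbour count, verbatim the inner fold of the port of A
def cntA (seats : List (List Int)) (like : List (Int × List Int)) (n r c : Int) : Int :=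
  [((0:Int),(1:Int)), (1,0), (-1,0), (0,-1)].foldl (fun cnt dd =>
    let nr := r + dd.1
    let nc := c + dd.2
    if 0 ≤ nr ∧ nr < n ∧ 0 ≤ nc ∧ nc < n then
      if likesOf like (seatAt seats r c) (seatAt seats nr nc) then cnt + 1 else cnt
    else cnt) 0

-- edge indicators (as functions of the cell (r,c) B's loop is visiting)
def eR (seats : List (List Int)) (like : List (Int × List Int)) (n r c : Int) : Int :=
  if c + 1 < n ∧ likesOf like (seatAt seats r c) (seatAt seats r (c + 1)) = true then 1 else 0
def eD (seats : List (List Int)) (like : List (Int × List Int)) (n r c : Int) : Int :=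
  if r + 1 < n ∧ likesOf like (seatAt seats r c) (seatAt seats (r + 1) c) = true then 1 else 0
def eL (seats : List (List Int)) (like : List (Int × List Int)) (n r c : Int) : Int :=
  if c + 1 < n ∧ likesOf like (seatAt seats r (c + 1)) (seatAt seats r c) = true then 1 else 0
def eU (seats : List (List Int)) (like : List (Int × List Int)) (n r c : Int) : Int :=
  if r + 1 < n ∧ likesOf like (seatAt seats (r + 1) c) (seatAt seats r c) = true then 1 else 0

-- contribution of B's step at cell (r,c) to the count of cell (r',c')
def delta (seats : List (List Int)) (like : List (Int × List Int)) (n r c r' c' : Int) : Int :=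
  (if r = r' ∧ c = c' then eR seats like n r c + eD seats like n r c else 0)
  + (if r = r' ∧ c = c' - 1 then eL seats like n r c else 0)
  + (if r = r' - 1 ∧ c = c' then eU seats like n r c else 0)

def gget (g : List (List Int)) (r c : Int) : Int := (g.getD r.toNat []).getD c.toNat 0

def dims (n : Int) (g : List (List Int)) : Prop :=
  g.length = n.toNat ∧ ∀ row ∈ g, row.length = n.toNat

lemma dims_bump (n : Int) (g : List (List Int)) (r c : Int) (hg : dims n g) :
    dims n (bBump g r c) := by
  by_cases hlt : r.toNat < g.length
  · obtain ⟨h1, h2⟩ := hg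
    refine ⟨by simpa [bBump] using h1, ?_⟩
    intro row hrow
    unfold bBump at hrow
    rw [List.modify_eq_set] at hrow
    rcases List.mem_or_eq_of_mem_set hrow with h | h
    · exact h2 _ h
    · subst h
      rw [List.length_modify, List.getElem?_eq_getElem hlt, Option.getD_some]
      exact h2 _ (List.getElem_mem hlt)
  · unfold bBump
    rw [List.modify_eq_self (Nat.le_of_not_lt hlt)]
    exact hg

lemma getD_modify {α : Type} (f : α → α) (l : List α) (i j : Nat) (d : α) :
    (l.modify i f).getD j d
      = if i = j ∧ j < l.length then f (l.getD j d) else l.getD j d := by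
  simp only [List.getD_eq_getElem?_getD]
  rw [List.getElem?_modify]
  by_cases hj : j < l.length
  · rw [List.getElem?_eq_getElem hj]
    by_cases hij : i = j
    · simp [hij, hj]
    · simp [hij]
  · rw [List.getElem?_eq_none (Nat.le_of_not_lt hj)]
    simp [hj]

lemma gget_bump (g : List (List Int)) (r c r' c' : Int)
    (hr : r.toNat < g.length) (hc : c.toNat < (g.getD r.toNat []).length)
    (h0r : 0 ≤ r) (h0c : 0 ≤ c) (h0r' : 0 ≤ r') (h0c' : 0 ≤ c') :
    gget (bBump g r c) r' c' = gget g r' c' + if r = r' ∧ c = c' then 1 else 0 := by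
  unfold gget bBump
  simp only [getD_modify]
  by_cases hmain : r.toNat = r'.toNat ∧ r'.toNat < g.length
  · rw [if_pos hmain]
    have hrew : g.getD r'.toNat [] = g.getD r.toNat [] := by rw [hmain.1]
    rw [hrew]
    simp only [getD_modify]
    by_cases hcol : c.toNat = c'.toNat ∧ c'.toNat < (g.getD r.toNat []).length
    · rw [if_pos hcol, if_pos (show r = r' ∧ c = c' by omega)]
    · rw [if_neg hcol, if_neg (show ¬(r = r' ∧ c = c') by omega), add_zero]
  · rw [if_neg hmain, if_neg (show ¬(r = r' ∧ c = c') by omega), add_zero]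

-- a guarded bump, the shape of each conditional update in B's loop body
def condBump (b : Bool) (g : List (List Int)) (r c : Int) : List (List Int) :=
  if b then bBump g r c else g

lemma dims_condBump (n : Int) (b : Bool) (g : List (List Int)) (r c : Int)
    (hg : dims n g) : dims n (condBump b g r c) := by
  cases b
  · simpa [condBump] using hg
  · simpa [condBump] using dims_bump n g r c hg

lemma gget_condBump (b : Bool) (g : List (List Int)) (r c r' c' : Int)
    (hr : r.toNat < g.length) (hc : c.toNat < (g.getD r.toNat []).length)
    (h0r : 0 ≤ r) (h0c : 0 ≤ c) (h0r' : 0 ≤ r') (h0c' : 0 ≤ c') :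
    gget (condBump b g r c) r' c'
      = gget g r' c' + if b = true ∧ r = r' ∧ c = c' then 1 else 0 := by
  cases b
  · simp [condBump]
  · simp only [condBump, if_pos]
    rw [gget_bump g r c r' c' hr hc h0r h0c h0r' h0c']
    simp

lemma bump_valid_row {n : Int} {g : List (List Int)} (hg : dims n g) {r : Int}
    (h1 : 0 ≤ r) (h2 : r < n) : r.toNat < g.length := by
  obtain ⟨hl, _⟩ := hg; omega

lemma bump_valid_col {n : Int} {g : List (List Int)} (hg : dims n g) {r c : Int}
    (h1 : 0 ≤ r) (h2 : r < n) (h3 : 0 ≤ c) (h4 : c < n) :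
    c.toNat < (g.getD r.toNat []).length := by
  obtain ⟨hl, hrow⟩ := hg
  have hlt : r.toNat < g.length := by omega
  rw [List.getD_eq_getElem?_getD, List.getElem?_eq_getElem hlt, Option.getD_some,
    hrow _ (List.getElem_mem hlt)]
  omega

lemma bCell_eq (seats : List (List Int)) (like : List (Int × List Int)) (n : Int)
    (g : List (List Int)) (r c : Int) :
    bCell seats like n g r c =
      if r + 1 < n then
        condBump (likesOf like (seatAt seats (r + 1) c) (seatAt seats r c))
          (condBump (likesOf like (seatAt seats r c) (seatAt seats (r + 1) c))
            (if c + 1 < n then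
              condBump (likesOf like (seatAt seats r (c + 1)) (seatAt seats r c))
                (condBump (likesOf like (seatAt seats r c) (seatAt seats r (c + 1))) g r c)
                r (c + 1)
            else g) r c) (r + 1) c
      else
        (if c + 1 < n then
          condBump (likesOf like (seatAt seats r (c + 1)) (seatAt seats r c))
            (condBump (likesOf like (seatAt seats r c) (seatAt seats r (c + 1))) g r c)
            r (c + 1)
        else g) := rfl

lemma dims_bCell (seats : List (List Int)) (like : List (Int × List Int)) (n : Int)
    (g : List (List Int)) (r c : Int) (hg : dims n g) :
    dims n (bCell seats like n g r c) := by
  rw [bCell_eq]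
  split_ifs <;> (repeat apply dims_condBump) <;> exact hg

lemma gget_bCell (seats : List (List Int)) (like : List (Int × List Int)) (n : Int)
    (g : List (List Int)) (r c : Int) (hg : dims n g)
    (hr : 0 ≤ r ∧ r < n) (hc : 0 ≤ c ∧ c < n) (r' c' : Int)
    (h0r' : 0 ≤ r') (h0c' : 0 ≤ c') :
    gget (bCell seats like n g r c) r' c'
      = gget g r' c' + delta seats like n r c r' c' := by
  obtain ⟨hr1, hr2⟩ := hr
  obtain ⟨hc1, hc2⟩ := hc
  rw [bCell_eq]
  unfold delta eR eD eL eU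
  by_cases hcn : c + 1 < n <;> by_cases hrn : r + 1 < n <;>
    simp only [hcn, hrn, if_true, if_false, true_and, false_and, and_true, and_false]
  · -- both edges exist
    have d1 : dims n (condBump (likesOf like (seatAt seats r c) (seatAt seats r (c + 1))) g r c) :=
      dims_condBump n _ g r c hg
    have d2 : dims n (condBump (likesOf like (seatAt seats r (c + 1)) (seatAt seats r c))
        (condBump (likesOf like (seatAt seats r c) (seatAt seats r (c + 1))) g r c) r (c + 1)) :=
      dims_condBump n _ _ r (c + 1) d1
    have d3 : dims n (condBump (likesOf like (seatAt seats r c) (seatAt seats (r + 1) c)) _ r c) :=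
      dims_condBump n _ _ r c d2
    rw [gget_condBump _ _ _ _ _ _
        (bump_valid_row d3 (by omega) hrn) (bump_valid_col d3 (by omega) hrn hc1 hc2)
        (by omega) hc1 h0r' h0c',
      gget_condBump _ _ _ _ _ _
        (bump_valid_row d2 hr1 hr2) (bump_valid_col d2 hr1 hr2 hc1 hc2)
        hr1 hc1 h0r' h0c',
      gget_condBump _ _ _ _ _ _
        (bump_valid_row d1 hr1 hr2) (bump_valid_col d1 hr1 hr2 (by omega) hcn)
        hr1 (by omega) h0r' h0c',
      gget_condBump _ _ _ _ _ _
        (bump_valid_row hg hr1 hr2) (bump_valid_col hg hr1 hr2 hc1 hc2)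
        hr1 hc1 h0r' h0c']
    cases hB1 : likesOf like (seatAt seats r c) (seatAt seats r (c + 1)) <;>
    cases hB2 : likesOf like (seatAt seats r (c + 1)) (seatAt seats r c) <;>
    cases hB3 : likesOf like (seatAt seats r c) (seatAt seats (r + 1) c) <;>
    cases hB4 : likesOf like (seatAt seats (r + 1) c) (seatAt seats r c) <;>
      simp only [hB1, hB2, hB3, hB4, Bool.false_eq_true, true_and, false_and,
        if_true, if_false] <;>
      split_ifs <;> omega
  · -- only the right edge
    have d1 : dims n (condBump (likesOf like (seatAt seats r c) (seatAt seats r (c + 1))) g r c) :=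
      dims_condBump n _ g r c hg
    rw [gget_condBump _ _ _ _ _ _
        (bump_valid_row d1 hr1 hr2) (bump_valid_col d1 hr1 hr2 (by omega) hcn)
        hr1 (by omega) h0r' h0c',
      gget_condBump _ _ _ _ _ _
        (bump_valid_row hg hr1 hr2) (bump_valid_col hg hr1 hr2 hc1 hc2)
        hr1 hc1 h0r' h0c']
    cases hB1 : likesOf like (seatAt seats r c) (seatAt seats r (c + 1)) <;>
    cases hB2 : likesOf like (seatAt seats r (c + 1)) (seatAt seats r c) <;>
      simp only [hB1, hB2, Bool.false_eq_true, true_and, false_and, if_true, if_false] <;>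
      split_ifs <;> omega
  · -- only the down edge
    have d2 : dims n (condBump (likesOf like (seatAt seats r c) (seatAt seats (r + 1) c)) g r c) :=
      dims_condBump n _ g r c hg
    rw [gget_condBump _ _ _ _ _ _
        (bump_valid_row d2 (by omega) hrn) (bump_valid_col d2 (by omega) hrn hc1 hc2)
        (by omega) hc1 h0r' h0c',
      gget_condBump _ _ _ _ _ _
        (bump_valid_row hg hr1 hr2) (bump_valid_col hg hr1 hr2 hc1 hc2)
        hr1 hc1 h0r' h0c']
    cases hB3 : likesOf like (seatAt seats r c) (seatAt seats (r + 1) c) <;>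
    cases hB4 : likesOf like (seatAt seats (r + 1) c) (seatAt seats r c) <;>
      simp only [hB3, hB4, Bool.false_eq_true, true_and, false_and, if_true, if_false] <;>
      split_ifs <;> omega
  · -- no edges
    split_ifs <;> omega

lemma fold_cells (seats : List (List Int)) (like : List (Int × List Int)) (n r : Int)
    (hr : 0 ≤ r ∧ r < n) :
    ∀ (cs : List Int), (∀ c ∈ cs, 0 ≤ c ∧ c < n) → ∀ g, dims n g →
      dims n (cs.foldl (fun g c => bCell seats like n g r c) g) ∧
      ∀ r' c', 0 ≤ r' → 0 ≤ c' →
        gget (cs.foldl (fun g c => bCell seats like n g r c) g) r' c'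
          = gget g r' c' + (cs.map (fun c => delta seats like n r c r' c')).sum := by
  intro cs
  induction cs with
  | nil => intro _ g hg; exact ⟨hg, by simp⟩
  | cons c cs ih =>
    intro hcs g hg
    have hc := hcs c List.mem_cons_self
    have hg' := dims_bCell seats like n g r c hg
    obtain ⟨ihd, ihs⟩ := ih (fun x hx => hcs x (List.mem_cons_of_mem _ hx)) _ hg'
    refine ⟨ihd, ?_⟩
    intro r' c' h0r' h0c'
    rw [List.foldl_cons, ihs r' c' h0r' h0c',
      gget_bCell seats like n g r c hg hr hc r' c' h0r' h0c']
    simp [add_assoc]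

lemma fold_rows (seats : List (List Int)) (like : List (Int × List Int)) (n : Int) :
    ∀ (rs : List Int), (∀ r ∈ rs, 0 ≤ r ∧ r < n) → ∀ g, dims n g →
      dims n (rs.foldl (fun g r => (PySem.List.pyRange 0 n 1).foldl
          (fun g c => bCell seats like n g r c) g) g) ∧
      ∀ r' c', 0 ≤ r' → 0 ≤ c' →
        gget (rs.foldl (fun g r => (PySem.List.pyRange 0 n 1).foldl
            (fun g c => bCell seats like n g r c) g) g) r' c'
          = gget g r' c'
            + (rs.map (fun r => ((PySem.List.pyRange 0 n 1).map
                (fun c => delta seats like n r c r' c')).sum)).sum := by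
  intro rs
  induction rs with
  | nil => intro _ g hg; exact ⟨hg, by simp⟩
  | cons r rs ih =>
    intro hrs g hg
    have hr := hrs r List.mem_cons_self
    have hcs : ∀ c ∈ PySem.List.pyRange 0 n 1, 0 ≤ c ∧ c < n := by
      intro c hcm; exact PySem.List.mem_pyRange_one.mp hcm
    obtain ⟨hgd, hgs⟩ := fold_cells seats like n r hr _ hcs g hg
    obtain ⟨ihd, ihs⟩ := ih (fun x hx => hrs x (List.mem_cons_of_mem _ hx)) _ hgd
    refine ⟨ihd, ?_⟩
    intro r' c' h0r' h0c'
    rw [List.foldl_cons, ihs r' c' h0r' h0c', hgs r' c' h0r' h0c']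
    simp [add_assoc]

lemma sum_ite_not_mem (l : List Int) (a : Int) (f : Int → Int) (h : a ∉ l) :
    (l.map (fun x => if x = a then f x else 0)).sum = 0 := by
  induction l with
  | nil => simp
  | cons x l ih =>
    have hxa : ¬(x = a) := fun hx => h (hx ▸ List.mem_cons_self)
    simp only [List.map_cons, List.sum_cons, if_neg hxa, zero_add]
    exact ih (fun hx => h (List.mem_cons_of_mem _ hx))

lemma sum_pick (l : List Int) (hl : l.Nodup) (a : Int) (f : Int → Int) :
    (l.map (fun x => if x = a then f x else 0)).sum = if a ∈ l then f a else 0 := by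
  induction l with
  | nil => simp
  | cons x l ih =>
    simp only [List.map_cons, List.sum_cons]
    rcases List.nodup_cons.mp hl with ⟨hx, hl'⟩
    by_cases hxa : x = a
    · subst hxa
      rw [if_pos rfl, sum_ite_not_mem l x f hx, if_pos List.mem_cons_self, add_zero]
    · rw [if_neg hxa, ih hl', zero_add]
      have : (a ∈ x :: l) ↔ (a ∈ l) := by
        constructor
        · intro h; rcases List.mem_cons.mp h with h | h
          · exact absurd h.symm hxa
          · exact h
        · exact List.mem_cons_of_mem _
      by_cases ha : a ∈ l <;> simp [ha, this]

lemma sum_pick_range (n a : Int) (f : Int → Int) :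
    ((PySem.List.pyRange 0 n 1).map (fun x => if x = a then f x else 0)).sum
      = if 0 ≤ a ∧ a < n then f a else 0 := by
  rw [sum_pick _ (PySem.List.nodup_pyRange_one 0 n) a f]
  by_cases h : a ∈ PySem.List.pyRange 0 n 1
  · have := PySem.List.mem_pyRange_one.mp h
    rw [if_pos h, if_pos this]
  · have : ¬(0 ≤ a ∧ a < n) := fun hc => h (PySem.List.mem_pyRange_one.mpr hc)
    rw [if_neg h, if_neg this]

lemma sum2_pick (n r0 c0 : Int) (f : Int → Int → Int) :
    ((PySem.List.pyRange 0 n 1).map (fun r =>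
      ((PySem.List.pyRange 0 n 1).map (fun c =>
        if r = r0 ∧ c = c0 then f r c else 0)).sum)).sum
      = if 0 ≤ r0 ∧ r0 < n ∧ 0 ≤ c0 ∧ c0 < n then f r0 c0 else 0 := by
  have hsw : ∀ r c : Int, (if r = r0 ∧ c = c0 then f r c else 0)
      = (fun x => if x = c0 then (if r = r0 then f r x else 0) else 0) c := by
    intro r c
    by_cases h1 : r = r0 <;> by_cases h2 : c = c0 <;> simp [h1, h2]
  have hinner : ∀ r : Int, ((PySem.List.pyRange 0 n 1).map (fun c =>
      if r = r0 ∧ c = c0 then f r c else 0)).sum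
      = if 0 ≤ c0 ∧ c0 < n then (if r = r0 then f r c0 else 0) else 0 := by
    intro r
    rw [show (fun c => if r = r0 ∧ c = c0 then f r c else 0)
        = (fun c => if c = c0 then (if r = r0 then f r c else 0) else 0)
      from funext fun c => hsw r c]
    exact sum_pick_range n c0 _
  rw [show (fun r => ((PySem.List.pyRange 0 n 1).map (fun c =>
      if r = r0 ∧ c = c0 then f r c else 0)).sum)
      = (fun r => if 0 ≤ c0 ∧ c0 < n then (if r = r0 then f r c0 else 0) else 0)
    from funext fun r => hinner r]
  by_cases hc : 0 ≤ c0 ∧ c0 < n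
  · simp only [if_pos hc]
    rw [show (fun r => if r = r0 then f r c0 else 0)
        = (fun x => if x = r0 then (fun y => f y c0) x else 0) from rfl]
    rw [sum_pick_range n r0 (fun y => f y c0)]
    split_ifs <;> tauto
  · simp only [if_neg hc]
    have : ¬(0 ≤ r0 ∧ r0 < n ∧ 0 ≤ c0 ∧ c0 < n) := by tauto
    simp [this]

set_option maxHeartbeats 1600000 in
lemma cnt_eq (seats : List (List Int)) (like : List (Int × List Int)) (n r' c' : Int)
    (h1 : 0 ≤ r') (h2 : r' < n) (h3 : 0 ≤ c') (h4 : c' < n) :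
    ((PySem.List.pyRange 0 n 1).map (fun r =>
      ((PySem.List.pyRange 0 n 1).map (fun c => delta seats like n r c r' c')).sum)).sum
      = cntA seats like n r' c' := by
  unfold delta
  have hsplit : ∀ r : Int,
      ((PySem.List.pyRange 0 n 1).map (fun c =>
        (if r = r' ∧ c = c' then eR seats like n r c + eD seats like n r c else 0)
        + (if r = r' ∧ c = c' - 1 then eL seats like n r c else 0)
        + (if r = r' - 1 ∧ c = c' then eU seats like n r c else 0))).sum
      = ((PySem.List.pyRange 0 n 1).map (fun c =>
          if r = r' ∧ c = c' then eR seats like n r c + eD seats like n r c else 0)).sum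
        + ((PySem.List.pyRange 0 n 1).map (fun c =>
            if r = r' ∧ c = c' - 1 then eL seats like n r c else 0)).sum
        + ((PySem.List.pyRange 0 n 1).map (fun c =>
            if r = r' - 1 ∧ c = c' then eU seats like n r c else 0)).sum := by
    intro r
    rw [show (fun c =>
        (if r = r' ∧ c = c' then eR seats like n r c + eD seats like n r c else 0)
        + (if r = r' ∧ c = c' - 1 then eL seats like n r c else 0)
        + (if r = r' - 1 ∧ c = c' then eU seats like n r c else 0))
        = (fun c =>
          ((if r = r' ∧ c = c' then eR seats like n r c + eD seats like n r c else 0)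
          + (if r = r' ∧ c = c' - 1 then eL seats like n r c else 0))
          + (if r = r' - 1 ∧ c = c' then eU seats like n r c else 0)) from rfl,
      PySem.List.sum_map_add_int, PySem.List.sum_map_add_int]
  rw [show (fun r => ((PySem.List.pyRange 0 n 1).map (fun c =>
      (if r = r' ∧ c = c' then eR seats like n r c + eD seats like n r c else 0)
      + (if r = r' ∧ c = c' - 1 then eL seats like n r c else 0)
      + (if r = r' - 1 ∧ c = c' then eU seats like n r c else 0))).sum)
      = (fun r =>
        (((PySem.List.pyRange 0 n 1).map (fun c =>
          if r = r' ∧ c = c' then eR seats like n r c + eD seats like n r c else 0)).sum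
        + ((PySem.List.pyRange 0 n 1).map (fun c =>
            if r = r' ∧ c = c' - 1 then eL seats like n r c else 0)).sum)
        + ((PySem.List.pyRange 0 n 1).map (fun c =>
            if r = r' - 1 ∧ c = c' then eU seats like n r c else 0)).sum)
    from funext fun r => hsplit r]
  rw [PySem.List.sum_map_add_int, PySem.List.sum_map_add_int]
  rw [sum2_pick n r' c' (fun r c => eR seats like n r c + eD seats like n r c),
    sum2_pick n r' (c' - 1) (fun r c => eL seats like n r c),
    sum2_pick n (r' - 1) c' (fun r c => eU seats like n r c)]
  rw [if_pos ⟨h1, h2, h3, h4⟩]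
  unfold cntA eR eD eL eU
  simp only [List.foldl]
  rw [show (r' + (0:Int)) = r' from by ring, show (c' + (0:Int)) = c' from by ring,
    show (r' + (1:Int)) = r' + 1 from rfl, show (c' + (1:Int)) = c' + 1 from rfl,
    show (r' + (-1:Int)) = r' - 1 from by ring, show (c' + (-1:Int)) = c' - 1 from by ring]
  rw [show (c' - 1 + 1 : Int) = c' from by ring, show (r' - 1 + 1 : Int) = r' from by ring]
  cases hB1 : likesOf like (seatAt seats r' c') (seatAt seats r' (c' + 1)) <;>
  cases hB2 : likesOf like (seatAt seats r' c') (seatAt seats (r' + 1) c') <;>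
  cases hB3 : likesOf like (seatAt seats r' c') (seatAt seats (r' - 1) c') <;>
  cases hB4 : likesOf like (seatAt seats r' c') (seatAt seats r' (c' - 1)) <;>
    simp only [Bool.false_eq_true, eq_self_iff_true, true_and, and_true, false_and,
      and_false, if_true, if_false] <;>
    split_ifs <;> omega

lemma gget_init (n : Int) (r c : Int) :
    gget (List.replicate n.toNat (List.replicate n.toNat (0 : Int))) r c = 0 := by
  unfold gget
  by_cases h : r.toNat < n.toNat <;>
    simp [List.getD_eq_getElem?_getD, List.getElem?_replicate, h] <;>
    split_ifs <;> simp

lemma dims_init (n : Int) :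
    dims n (List.replicate n.toNat (List.replicate n.toNat (0 : Int))) := by
  constructor
  · simp
  · intro row hrow
    rw [List.eq_of_mem_replicate hrow]
    simp

set_option maxHeartbeats 800000 in
lemma cntA_bounds (seats : List (List Int)) (like : List (Int × List Int)) (n r c : Int) :
    0 ≤ cntA seats like n r c ∧ cntA seats like n r c ≤ 4 := by
  unfold cntA
  simp only [List.foldl]
  split_ifs <;> omega

lemma score_eq (k : Int) (h1 : 0 ≤ k) (h2 : k ≤ 4) : scoreA k = score10 k := by
  unfold scoreA score10
  interval_cases k <;> decide

lemma A_sum (seats : List (List Int)) (like : List (Int × List Int)) (n : Int) :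
    calS seats like n
      = ((PySem.List.pyRange 0 n 1).map (fun r =>
          ((PySem.List.pyRange 0 n 1).map (fun c =>
            scoreA (cntA seats like n r c))).sum)).sum := by
  unfold calS
  have hinner : ∀ r : Int, (fun (satisfaction c : Int) =>
      let cnt : Int := [((0:Int),(1:Int)), (1,0), (-1,0), (0,-1)].foldl (fun cnt dd =>
        let nr := r + dd.1
        let nc := c + dd.2
        if 0 ≤ nr ∧ nr < n ∧ 0 ≤ nc ∧ nc < n then
          if likesOf like (seatAt seats r c) (seatAt seats nr nc) then cnt + 1 else cnt
        else cnt) 0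
      if cnt = 1 then satisfaction + 1
      else if cnt = 2 then satisfaction + 10
      else if cnt = 3 then satisfaction + 100
      else if cnt = 4 then satisfaction + 1000
      else satisfaction)
      = (fun satisfaction c => satisfaction + scoreA (cntA seats like n r c)) := by
    intro r
    funext satisfaction c
    show (if cntA seats like n r c = 1 then satisfaction + 1
      else if cntA seats like n r c = 2 then satisfaction + 10
      else if cntA seats like n r c = 3 then satisfaction + 100
      else if cntA seats like n r c = 4 then satisfaction + 1000
      else satisfaction) = satisfaction + scoreA (cntA seats like n r c)
    unfold scoreA
    split_ifs <;> omega
  have houter : (fun (satisfaction r : Int) =>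
      (PySem.List.pyRange 0 n 1).foldl (fun satisfaction c =>
        let cnt : Int := [((0:Int),(1:Int)), (1,0), (-1,0), (0,-1)].foldl (fun cnt dd =>
          let nr := r + dd.1
          let nc := c + dd.2
          if 0 ≤ nr ∧ nr < n ∧ 0 ≤ nc ∧ nc < n then
            if likesOf like (seatAt seats r c) (seatAt seats nr nc) then cnt + 1 else cnt
          else cnt) 0
        if cnt = 1 then satisfaction + 1
        else if cnt = 2 then satisfaction + 10
        else if cnt = 3 then satisfaction + 100
        else if cnt = 4 then satisfaction + 1000
        else satisfaction) satisfaction)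
      = (fun satisfaction r => satisfaction
          + ((PySem.List.pyRange 0 n 1).map (fun c => scoreA (cntA seats like n r c))).sum) := by
    funext satisfaction r
    rw [hinner r, PySem.List.foldl_add]
  rw [houter, PySem.List.foldl_add]
  simp

lemma B_sum (g : List (List Int)) :
    g.foldl (fun total row => row.foldl (fun total v =>
        if v ≠ 0 then total + 10 ^ (v - 1).toNat else total) total) 0
      = (g.map (fun row => (row.map score10).sum)).sum := by
  have hrow : (fun (total v : Int) => if v ≠ 0 then total + 10 ^ (v - 1).toNat else total)
      = (fun total v => total + score10 v) := by
    funext total v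
    unfold score10
    split_ifs <;> omega
  have houter : (fun (total : Int) (row : List Int) => row.foldl (fun total v =>
      if v ≠ 0 then total + 10 ^ (v - 1).toNat else total) total)
      = (fun total row => total + (row.map score10).sum) := by
    funext total row
    rw [hrow, PySem.List.foldl_add]
  rw [houter, PySem.List.foldl_add]
  simp

lemma rows_to_indices (n : Int) (hn : 0 ≤ n) (g : List (List Int)) (hg : dims n g)
    (f : Int → Int) :
    (g.map (fun row => (row.map f).sum)).sum
      = ((PySem.List.pyRange 0 n 1).map (fun r =>
          ((PySem.List.pyRange 0 n 1).map (fun c => f (gget g r c))).sum)).sum := by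
  obtain ⟨hlen, hrows⟩ := hg
  have hcast : ((g.length : Int)) = n := by omega
  conv_lhs => rw [← PySem.List.map_pyGetD_pyRange_zero' g ([] : List Int)]
  rw [hcast, List.map_map]
  congr 1
  apply List.map_congr_left
  intro r hrmem
  obtain ⟨hr0, hrn⟩ := PySem.List.mem_pyRange_one.mp hrmem
  have hrow : PySem.List.pyGetD g r [] = g.getD r.toNat [] :=
    PySem.List.pyGetD_of_nonneg g [] hr0
  have hrlt : r.toNat < g.length := by omega
  have hrowmem : g.getD r.toNat [] ∈ g := by
    rw [List.getD_eq_getElem?_getD, List.getElem?_eq_getElem hrlt, Option.getD_some]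
    exact List.getElem_mem hrlt
  have hrowlen : ((g.getD r.toNat []).length : Int) = n := by
    rw [hrows _ hrowmem]; omega
  show (List.map f (PySem.List.pyGetD g r [])).sum = _
  rw [hrow]
  conv_lhs => rw [← PySem.List.map_pyGetD_pyRange_zero' (g.getD r.toNat []) (0 : Int)]
  rw [hrowlen, List.map_map]
  apply congrArg
  apply List.map_congr_left
  intro c hcmem
  obtain ⟨hc0, _⟩ := PySem.List.mem_pyRange_one.mp hcmem
  show f (PySem.List.pyGetD (g.getD r.toNat []) c 0) = f (gget g r c)
  rw [PySem.List.pyGetD_of_nonneg _ _ hc0]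
  rfl

-- ===== VERDICT (by name: the statement is the Claim_ definition above) =====
theorem calS_spec : Claim_equal_calS := by
  intro seats like n _ _
  unfold Spec_calS
  by_cases hn : 0 ≤ n
  · -- main case
    have hcs : ∀ r ∈ PySem.List.pyRange 0 n 1, 0 ≤ r ∧ r < n := by
      intro r hrm; exact PySem.List.mem_pyRange_one.mp hrm
    obtain ⟨hgd, hgs⟩ := fold_rows seats like n (PySem.List.pyRange 0 n 1) hcs
      (List.replicate n.toNat (List.replicate n.toNat (0 : Int))) (dims_init n)
    unfold calS_alt
    rw [B_sum, rows_to_indices n hn _ hgd score10, A_sum seats like n]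
    apply congrArg
    apply List.map_congr_left
    intro r hrmem
    obtain ⟨hr0, hrn⟩ := PySem.List.mem_pyRange_one.mp hrmem
    apply congrArg
    apply List.map_congr_left
    intro c hcmem
    obtain ⟨hc0, hcn⟩ := PySem.List.mem_pyRange_one.mp hcmem
    have hval : gget ((PySem.List.pyRange 0 n 1).foldl (fun g r =>
        (PySem.List.pyRange 0 n 1).foldl (fun g c => bCell seats like n g r c) g)
        (List.replicate n.toNat (List.replicate n.toNat (0 : Int)))) r c
        = cntA seats like n r c := by
      rw [hgs r c hr0 hc0, gget_init, zero_add, cnt_eq seats like n r c hr0 hrn hc0 hcn]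
    rw [hval]
    obtain ⟨hb1, hb2⟩ := cntA_bounds seats like n r c
    exact score_eq _ hb1 hb2
  · -- n < 0: both sides are 0
    have hnil : PySem.List.pyRange 0 n 1 = [] :=
      PySem.List.pyRange_one_eq_nil (by omega)
    have hz : n.toNat = 0 := by omega
    unfold calS calS_alt
    rw [hnil, hz]
    simp
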